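-- pv_equiv track=rewrite | github.com/JustAdrix/Curs | Curs_10_Concepte_Avansate/generator.py | even_gen
-- ===== SOURCE A (Python) =====
-- def even_gen(n):
--     generated_nr = 0
--     curent = 0
--     while generated_nr < n:
--         curent += 1
--         if curent % 2 == 0:
--             yield curent
--             generated_nr += 1
-- ===== SOURCE B (Python) =====
-- def even_gen(n):
--     yield from range(2, 2 * n + 2, 2)
-- ===== Notes on version B (the rewrite author's own statement) =====
-- stated objective: simpler
-- what changed: B replaces A's scan-all-integers-and-filter-by-parity loop with a single closed-form arithmetic range yielding the even numbers directly, removing both loop state variables and the parity test.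
import Mathlib
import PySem

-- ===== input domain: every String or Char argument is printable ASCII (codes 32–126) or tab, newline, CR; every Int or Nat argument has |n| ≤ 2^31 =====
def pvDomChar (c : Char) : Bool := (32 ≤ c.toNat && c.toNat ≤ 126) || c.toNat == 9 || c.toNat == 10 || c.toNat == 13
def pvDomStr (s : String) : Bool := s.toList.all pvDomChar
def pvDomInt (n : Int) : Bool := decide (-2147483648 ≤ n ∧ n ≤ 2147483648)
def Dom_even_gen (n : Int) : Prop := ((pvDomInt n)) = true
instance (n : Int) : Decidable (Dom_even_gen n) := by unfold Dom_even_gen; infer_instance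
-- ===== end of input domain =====

-- B replaces A's scan-and-filter-by-parity loop with a closed-form range(2, 2n+2, 2)
-- (simpler: no loop state, no parity branch).

-- ===== PORT A =====
-- A's while loop: state (generated_nr, curent); each step increments curent and
-- yields it (incrementing generated_nr) only when curent % 2 == 0.  The Nat fuel
-- only makes the loop total: 2*n steps always suffice, so it never cuts it short.
def even_gen_loop (fuel : Nat) (n generated_nr curent : Int) : List Int :=
  match fuel with
  | 0 => []
  | fuel + 1 =>
    if generated_nr < n then
      let curent' := curent + 1
      if PySem.Int.mod curent' 2 = 0 then
        curent' :: even_gen_loop fuel n (generated_nr + 1) curent'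
      else
        even_gen_loop fuel n generated_nr curent'
    else []

def even_gen (n : Int) : List Int := even_gen_loop (2 * n).toNat n 0 0

-- ===== PORT B =====
-- B: 'yield from range(2, 2*n + 2, 2)'.
def even_gen_alt (n : Int) : List Int := PySem.List.pyRange 2 (2 * n + 2) 2

-- ===== PRECONDITION & SPEC =====
def Spec_even_gen (n : Int) (out : List Int) : Prop := out = even_gen_alt n
instance (n : Int) (out : List Int) : Decidable (Spec_even_gen n out) := by unfold Spec_even_gen; infer_instance

-- ===== CLAIM (what is proved, stated in full; the proofs are below) =====
def Claim_equal_even_gen : Prop := ∀ (n : Int), Dom_even_gen n → Spec_even_gen n (even_gen n)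

-- ===== LEMMAS AND PROOFS =====
theorem pyRange_two_nil (a b : Int) (h : b ≤ a) : PySem.List.pyRange a b 2 = [] := by
  rw [PySem.List.pyRange_of_pos a b (by norm_num)]
  simp [show ¬ a < b by omega]

theorem pyRange_two_cons (a b : Int) (h : a < b) :
    PySem.List.pyRange a b 2 = a :: PySem.List.pyRange (a + 2) b 2 := by
  rw [PySem.List.pyRange_of_pos a b (by norm_num),
      PySem.List.pyRange_of_pos (a + 2) b (by norm_num)]
  have hcount : (if a < b then ((b - a + 2 - 1) / 2).toNat else 0)
      = (if a + 2 < b then ((b - (a + 2) + 2 - 1) / 2).toNat else 0) + 1 := by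
    split_ifs <;> omega
  rw [hcount, List.range_succ_eq_map, List.map_cons, List.map_map]
  refine List.cons_eq_cons.mpr ⟨by push_cast; ring, ?_⟩
  simp only [List.map_inj_left, Function.comp]
  intro k _
  push_cast
  ring

-- Invariant: at the top of A's loop curent = 2 * generated_nr; the tail of A's
-- output from there is exactly the arithmetic range of the remaining evens.
theorem even_gen_loop_eq (n : Int) (k : Nat) (gen : Int) (hk : n ≤ gen + k) :
    even_gen_loop (2 * k) n gen (2 * gen) = PySem.List.pyRange (2 * gen + 2) (2 * n + 2) 2 := by
  induction k generalizing gen with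
  | zero =>
    simp only [even_gen_loop]
    exact (pyRange_two_nil _ _ (by omega)).symm
  | succ k ih =>
    by_cases h : gen < n
    · have e1 : 2 * (k + 1) = (2 * k + 1) + 1 := by omega
      rw [e1, even_gen_loop]
      have hodd : ¬ PySem.Int.mod (2 * gen + 1) 2 = 0 := by
        rw [PySem.Int.mod_eq_emod_of_pos (by norm_num : (0:Int) < 2)]; omega
      simp only [h, if_true, hodd, if_false]
      rw [even_gen_loop]
      have heven : PySem.Int.mod (2 * gen + 1 + 1) 2 = 0 := by
        rw [PySem.Int.mod_eq_emod_of_pos (by norm_num : (0:Int) < 2)]; omega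
      simp only [h, if_true, heven]
      rw [pyRange_two_cons _ _ (by omega)]
      have e2 : 2 * gen + 1 + 1 = 2 * (gen + 1) := by ring
      have e3 : 2 * gen + 2 + 2 = 2 * (gen + 1) + 2 := by ring
      rw [e2, e3, ih (gen + 1) (by push_cast at hk ⊢; omega)]
      congr 1
      omega
    · have e1 : 2 * (k + 1) = (2 * k + 1) + 1 := by omega
      rw [e1, even_gen_loop]
      simp only [h, if_false]
      exact (pyRange_two_nil _ _ (by omega)).symm

-- ===== VERDICT (by name: the statement is the Claim_ definition above) =====
theorem even_gen_spec : Claim_equal_even_gen := by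
  intro n _
  unfold Spec_even_gen even_gen even_gen_alt
  have e : (2 * n).toNat = 2 * n.toNat := by omega
  rw [e]
  simpa using even_gen_loop_eq n n.toNat 0 (by omega)
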